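-- pv_equiv track=rewrite | github.com/yu2799/AtCoder | meetup/230506/6.py | dfs
-- ===== SOURCE A (Python) =====
-- from collections import defaultdict, deque
--
-- def dfs(graph):
--     res = 0
--     visited = set()
--     next_visit = deque([1])
--     while next_visit:
--         cur = next_visit.pop()
--         if res < cur:
--             res = cur
--         if cur not in visited:
--             next_visit.append(cur)
--             visited.add(cur)
--             for i in graph[cur]:
--                 next_visit.append(i)
--
--     return res
-- ===== SOURCE B (Python) =====
-- def dfs(graph):
--     visited = {1}
--     frontier = [1]
--     while frontier:
--         nxt = []
--         for node in frontier:
--             for nb in graph[node]: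
--                 if nb not in visited:
--                     visited.add(nb)
--                     nxt.append(nb)
--         frontier = nxt
--     return max(visited)
-- ===== Notes on version B (the rewrite author's own statement) =====
-- stated objective: alternative
-- what changed: Replaces A's right-end deque stack with per-pop max tracking and re-pushing of visited nodes by a layered BFS that marks nodes before enqueueing (so nothing is ever enqueued twice) and takes max(visited) once at the end.
import Mathlib
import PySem

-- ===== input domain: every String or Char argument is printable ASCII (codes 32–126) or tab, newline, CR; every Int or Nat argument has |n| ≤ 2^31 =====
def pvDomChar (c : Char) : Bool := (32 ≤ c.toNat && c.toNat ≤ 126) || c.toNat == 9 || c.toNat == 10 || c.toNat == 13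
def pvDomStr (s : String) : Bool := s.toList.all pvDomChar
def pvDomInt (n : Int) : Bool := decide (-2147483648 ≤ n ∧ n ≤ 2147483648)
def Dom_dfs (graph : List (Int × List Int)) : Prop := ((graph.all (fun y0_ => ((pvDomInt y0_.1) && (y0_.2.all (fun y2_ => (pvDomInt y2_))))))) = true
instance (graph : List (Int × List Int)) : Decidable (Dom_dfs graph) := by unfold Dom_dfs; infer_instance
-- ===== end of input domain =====

-- B replaces A's right-end deque stack (with per-pop max updates and re-pushed visited nodes)
-- by a layered BFS that marks nodes before enqueueing and takes max(visited) at the end.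

-- ===== PORT A =====
-- graph[cur] : Python dict indexing; a missing key is a KeyError, excluded by Pre_dfs,
-- so the total form getD … [] is only evaluated where the key is present (inside Pre_dfs).
def pyAdj (graph : List (Int × List Int)) (v : Int) : List Int :=
  (PySem.Dict.mk graph).getD v []

-- nodes that can ever be pushed: 1 and every adjacency-list entry (used only to size the fuel)
def pvNodes (graph : List (Int × List Int)) : List Int :=
  PySem.Set.ofList (1 :: graph.flatMap Prod.snd)

-- an upper bound on the number of loop iterations of A (each iteration pops once;
-- total pushes ≤ 1 + Σ_{v pushable} (1 + |graph[v]|)); proved sufficient below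
def pvFuel (graph : List (Int × List Int)) : Nat :=
  2 + ((pvNodes graph).map (fun v => 1 + (pyAdj graph v).length)).sum

-- the while loop of A; the deque is kept reversed (head = right end), so
-- deque.pop() = take the head and deque.append(x) = cons x
def dfsLoop (graph : List (Int × List Int)) : Nat → List Int → PySem.Set Int → Int → Int
  | 0, _, _, res => res
  | _ + 1, [], _, res => res
  | fuel + 1, cur :: rest, visited, res =>
    let res' := if res < cur then cur else res
    if PySem.Set.contains visited cur then
      dfsLoop graph fuel rest visited res'
    else
      dfsLoop graph fuel ((pyAdj graph cur).reverse ++ cur :: rest)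
        (PySem.Set.add visited cur) res'

def dfs (graph : List (Int × List Int)) : Int :=
  dfsLoop graph (pvFuel graph) [1] PySem.Set.empty 0

-- ===== PORT B =====
-- inner 'for nb in graph[node]' loop of B: state = (visited, nxt)
def bfsInner (graph : List (Int × List Int)) (st : PySem.Set Int × List Int) (node : Int) :
    PySem.Set Int × List Int :=
  (pyAdj graph node).foldl
    (fun st2 nb =>
      if PySem.Set.contains st2.1 nb then st2
      else (PySem.Set.add st2.1 nb, st2.2 ++ [nb])) st

-- rounds of B's while loop are bounded by 2 + |pvNodes| (each round with a nonempty
-- next frontier marks a fresh node); proved sufficient below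
def pvFuelB (graph : List (Int × List Int)) : Nat := 2 + (pvNodes graph).length

def bfsLoop (graph : List (Int × List Int)) : Nat → List Int → PySem.Set Int → PySem.Set Int
  | 0, _, visited => visited
  | fuel + 1, frontier, visited =>
    if frontier.isEmpty then visited
    else
      let st := frontier.foldl (bfsInner graph) (visited, ([] : List Int))
      bfsLoop graph fuel st.2 st.1

def dfs_alt (graph : List (Int × List Int)) : Int :=
  match PySem.List.max? (bfsLoop graph (pvFuelB graph) [1] (PySem.Set.ofList [1])) (fun x => x) with
  | some m => m
  | none => 0   -- unreachable: the visited set always contains 1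

-- ===== PRECONDITION & SPEC =====
-- the adjacency list of v as Pre_dfs reads it (no entry = no outgoing edges)
def pvLookup (graph : List (Int × List Int)) (v : Int) : List Int :=
  match graph.find? (fun p => p.1 == v) with
  | some p => p.2
  | none => []

-- the set of nodes reachable from node 1: after k rounds it holds every node at
-- distance ≤ k, and distances are bounded by the number of keys, so |graph| + 1
-- saturating rounds reach every reachable node
def pvReachable (graph : List (Int × List Int)) : List Int :=
  (fun s => PySem.Set.update s (s.flatMap (pvLookup graph)))^[graph.length + 1] [1]

-- Pre_dfs: every node reachable from node 1 (including node 1 itself) has an entry in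
-- graph; on exactly the remaining inputs Python's graph[cur] raises KeyError.
def Pre_dfs (graph : List (Int × List Int)) : Prop :=
  ∀ x ∈ pvReachable graph, ∃ q ∈ graph, q.1 = x
instance (graph : List (Int × List Int)) : Decidable (Pre_dfs graph) := by
  unfold Pre_dfs; infer_instance

def pvWitness_dfs : (List (Int × List Int)) := [(1, [2]), (2, [1])]

def Spec_dfs (graph : List (Int × List Int)) (out : Int) : Prop := out = dfs_alt graph
instance (graph : List (Int × List Int)) (out : Int) : Decidable (Spec_dfs graph out) := by
  unfold Spec_dfs; infer_instance

-- ===== CLAIM (what is proved, stated in full; the proofs are below) =====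
def Claim_equal_dfs : Prop :=
  ∀ (graph : List (Int × List Int)), Dom_dfs graph → Pre_dfs graph → Spec_dfs graph (dfs graph)

-- ===== LEMMAS AND PROOFS =====

-- the nodes reachable from 1 (where a node with no dict entry has no neighbours)
inductive Reach (graph : List (Int × List Int)) : Int → Prop
  | one : Reach graph 1
  | step {v nb : Int} : Reach graph v → nb ∈ pyAdj graph v → Reach graph nb

lemma mem_pyAdj_flatMap (graph : List (Int × List Int)) (v x : Int)
    (hx : x ∈ pyAdj graph v) : x ∈ graph.flatMap Prod.snd := by
  induction graph with
  | nil => simp [pyAdj, PySem.Dict.getD, PySem.Dict.get?] at hx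
  | cons p rest ih =>
    obtain ⟨k, l⟩ := p
    rw [pyAdj, PySem.Dict.getD_eq_get?_getD, PySem.Dict.get?_mk_cons] at hx
    by_cases hk : (k == v) = true
    · simp [hk] at hx
      simp [List.flatMap_cons]
      exact Or.inl hx
    · simp [hk] at hx
      have : x ∈ List.flatMap Prod.snd rest := by
        refine ih ?_
        rw [pyAdj, PySem.Dict.getD_eq_get?_getD]
        exact hx
      simp [List.flatMap_cons] at this ⊢
      tauto

lemma mem_pyAdj_pvNodes (graph : List (Int × List Int)) (v x : Int)
    (hx : x ∈ pyAdj graph v) : x ∈ pvNodes graph := by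
  rw [pvNodes, PySem.Set.mem_ofList]
  exact List.mem_cons_of_mem _ (mem_pyAdj_flatMap graph v x hx)

lemma one_mem_pvNodes (graph : List (Int × List Int)) : (1 : Int) ∈ pvNodes graph := by
  rw [pvNodes, PySem.Set.mem_ofList]
  exact List.mem_cons_self

-- closure minimality: any set containing 1 and closed under pyAdj contains every reachable node
lemma reach_subset_closed (graph : List (Int × List Int)) (S : List Int)
    (h1 : (1 : Int) ∈ S) (hc : ∀ v ∈ S, ∀ nb ∈ pyAdj graph v, nb ∈ S) :
    ∀ v, Reach graph v → v ∈ S := by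
  intro v hv
  induction hv with
  | one => exact h1
  | step hv hnb ih => exact hc _ ih _ hnb

def phiA (graph : List (Int × List Int)) (stack visited : List Int) : Nat :=
  stack.length +
    ∑ v ∈ (pvNodes graph).toFinset \ visited.toFinset, (1 + (pyAdj graph v).length)

lemma dfsLoop_main (graph : List (Int × List Int)) :
    ∀ (fuel : Nat) (stack visited : List Int) (res : Int),
      phiA graph stack visited < fuel →
      (∀ v ∈ stack, Reach graph v) →
      (∀ v ∈ stack, v ∈ pvNodes graph) →
      (∀ v ∈ visited, ∀ nb ∈ pyAdj graph v, nb ∈ visited ∨ nb ∈ stack) →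
      ((1 : Int) ∈ visited ∨ (1 : Int) ∈ stack) →
      (∀ v ∈ visited, v ≤ res) →
      (res = 0 ∨ Reach graph res) →
      (∀ v, Reach graph v → v ≤ dfsLoop graph fuel stack visited res) ∧
        (dfsLoop graph fuel stack visited res = 0 ∨
          Reach graph (dfsLoop graph fuel stack visited res)) := by
  intro fuel
  induction fuel with
  | zero => intro stack visited res hphi; exact absurd hphi (Nat.not_lt_zero _)
  | succ fuel ih =>
    intro stack visited res hphi hs hsP hcl h1 hr h0
    cases stack with
    | nil =>
      simp only [dfsLoop]
      refine ⟨?_, h0⟩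
      intro v hv
      refine hr v (reach_subset_closed graph visited ?_ ?_ v hv)
      · exact h1.resolve_right (by simp)
      · intro a ha nb hnb
        exact (hcl a ha nb hnb).resolve_right (by simp)
    | cons cur rest =>
      simp only [dfsLoop]
      have hcur_reach : Reach graph cur := hs cur List.mem_cons_self
      have hcurle : cur ≤ (if res < cur then cur else res) := by split <;> omega
      have hresle : ∀ v ∈ visited, v ≤ (if res < cur then cur else res) := by
        intro v hv
        have := hr v hv
        split <;> omega
      have h0' : (if res < cur then cur else res) = 0 ∨
          Reach graph (if res < cur then cur else res) := by
        split
        · exact Or.inr hcur_reach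
        · exact h0
      by_cases hc : PySem.Set.contains visited cur = true
      · simp only [hc, if_true]
        have hcv : cur ∈ visited := (PySem.Set.contains_iff _ _).mp hc
        refine ih rest visited _ ?_ ?_ ?_ ?_ ?_ hresle h0'
        · unfold phiA at hphi ⊢
          simp only [List.length_cons] at hphi
          omega
        · exact fun v hv => hs v (List.mem_cons_of_mem _ hv)
        · exact fun v hv => hsP v (List.mem_cons_of_mem _ hv)
        · intro v hv nb hnb
          rcases hcl v hv nb hnb with h | h
          · exact Or.inl h
          · rcases List.mem_cons.mp h with h' | h'
            · exact Or.inl (h' ▸ hcv)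
            · exact Or.inr h'
        · rcases h1 with h | h
          · exact Or.inl h
          · rcases List.mem_cons.mp h with h' | h'
            · exact Or.inl (h' ▸ hcv)
            · exact Or.inr h'
      · simp only [hc, if_false, Bool.false_eq_true]
        have hcv : cur ∉ visited := fun h => hc ((PySem.Set.contains_iff _ _).mpr h)
        rw [PySem.Set.add_of_not_mem hcv]
        refine ih _ _ _ ?_ ?_ ?_ ?_ ?_ ?_ h0'
        · -- the potential drops by exactly one in the visit branch
          have hmem : cur ∈ (pvNodes graph).toFinset \ visited.toFinset := by
            simp only [Finset.mem_sdiff, List.mem_toFinset]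
            exact ⟨hsP cur List.mem_cons_self, hcv⟩
          have hsd : (pvNodes graph).toFinset \ (visited ++ [cur]).toFinset =
              ((pvNodes graph).toFinset \ visited.toFinset).erase cur := by
            ext x
            simp only [Finset.mem_sdiff, Finset.mem_erase, List.mem_toFinset,
              List.mem_append, List.mem_singleton]
            tauto
          have hsum := Finset.add_sum_erase _ (fun v => 1 + (pyAdj graph v).length) hmem
          beta_reduce at hsum
          unfold phiA at hphi ⊢
          rw [hsd]
          simp only [List.length_append, List.length_reverse, List.length_cons] at hphi ⊢
          omega
        · intro v hv
          rcases List.mem_append.mp hv with h | h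
          · exact Reach.step hcur_reach (List.mem_reverse.mp h)
          · rcases List.mem_cons.mp h with h' | h'
            · exact h' ▸ hcur_reach
            · exact hs v (List.mem_cons_of_mem _ h')
        · intro v hv
          rcases List.mem_append.mp hv with h | h
          · exact mem_pyAdj_pvNodes graph cur v (List.mem_reverse.mp h)
          · rcases List.mem_cons.mp h with h' | h'
            · exact h' ▸ hsP cur List.mem_cons_self
            · exact hsP v (List.mem_cons_of_mem _ h')
        · intro v hv nb hnb
          rcases List.mem_append.mp hv with h | h
          · rcases hcl v h nb hnb with h' | h'
            · exact Or.inl (List.mem_append.mpr (Or.inl h'))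
            · rcases List.mem_cons.mp h' with h'' | h''
              · exact Or.inl (List.mem_append.mpr (Or.inr (h'' ▸ List.mem_singleton_self _)))
              · exact Or.inr (List.mem_append.mpr (Or.inr (List.mem_cons_of_mem _ h'')))
          · have hvc : v = cur := List.mem_singleton.mp h
            subst hvc
            exact Or.inr (List.mem_append.mpr (Or.inl (List.mem_reverse.mpr hnb)))
        · rcases h1 with h | h
          · exact Or.inl (List.mem_append.mpr (Or.inl h))
          · rcases List.mem_cons.mp h with h' | h'
            · exact Or.inl (List.mem_append.mpr (Or.inr (by simp [h'])))
            · exact Or.inr (List.mem_append.mpr (Or.inr (List.mem_cons_of_mem _ h')))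
        · intro v hv
          rcases List.mem_append.mp hv with h | h
          · exact hresle v h
          · exact (List.mem_singleton.mp h) ▸ hcurle

lemma sum_toFinset_le (l : List Int) (f : Int → Nat) : ∑ v ∈ l.toFinset, f v ≤ (l.map f).sum := by
  induction l with
  | nil => simp
  | cons a t ih =>
    rw [List.toFinset_cons]
    by_cases h : a ∈ t.toFinset
    · rw [Finset.insert_eq_self.mpr h]
      simp only [List.map_cons, List.sum_cons]
      omega
    · rw [Finset.sum_insert h]
      simp only [List.map_cons, List.sum_cons]
      omega

lemma dfs_char (graph : List (Int × List Int)) :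
    (∀ v, Reach graph v → v ≤ dfs graph) ∧ Reach graph (dfs graph) := by
  have h := dfsLoop_main graph (pvFuel graph) [1] PySem.Set.empty 0
    (by
      unfold phiA pvFuel
      have he : (PySem.Set.empty : List Int).toFinset = ∅ := rfl
      rw [he, Finset.sdiff_empty]
      have := sum_toFinset_le (pvNodes graph) (fun v => 1 + (pyAdj graph v).length)
      simp only [List.length_cons, List.length_nil]
      omega)
    (by intro v hv; rw [List.mem_singleton.mp hv]; exact Reach.one)
    (by intro v hv; rw [List.mem_singleton.mp hv]; exact one_mem_pvNodes graph)
    (by intro v hv; exact absurd hv (List.not_mem_nil))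
    (Or.inr (List.mem_singleton_self _))
    (by intro v hv; exact absurd hv (List.not_mem_nil))
    (Or.inl rfl)
  rw [show dfs graph = dfsLoop graph (pvFuel graph) [1] PySem.Set.empty 0 from rfl]
  refine ⟨h.1, ?_⟩
  rcases h.2 with h' | h'
  · have := h.1 1 Reach.one
    omega
  · exact h'

def phiB (graph : List (Int × List Int)) (frontier visited : List Int) : Nat :=
  (if frontier = [] then 0 else 1) +
    ((pvNodes graph).toFinset \ visited.toFinset).card

-- the inner 'for nb in graph[node]' fold of B: characterisation of (visited, nxt)
lemma foldl_inner_char (V : List Int) :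
    ∀ (l : List Int) (st : PySem.Set Int × List Int),
      (∀ x : Int, x ∈ st.1 ↔ x ∈ V ∨ x ∈ st.2) →
      (∀ x : Int, x ∈ (l.foldl (fun st2 nb =>
          if PySem.Set.contains st2.1 nb then st2
          else (PySem.Set.add st2.1 nb, st2.2 ++ [nb])) st).1 ↔
        x ∈ V ∨ x ∈ (l.foldl (fun st2 nb =>
          if PySem.Set.contains st2.1 nb then st2
          else (PySem.Set.add st2.1 nb, st2.2 ++ [nb])) st).2) ∧
      (∀ x ∈ l, x ∈ (l.foldl (fun st2 nb =>
          if PySem.Set.contains st2.1 nb then st2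
          else (PySem.Set.add st2.1 nb, st2.2 ++ [nb])) st).1) ∧
      (∀ x ∈ st.2, x ∈ (l.foldl (fun st2 nb =>
          if PySem.Set.contains st2.1 nb then st2
          else (PySem.Set.add st2.1 nb, st2.2 ++ [nb])) st).2) ∧
      (∀ x ∈ (l.foldl (fun st2 nb =>
          if PySem.Set.contains st2.1 nb then st2
          else (PySem.Set.add st2.1 nb, st2.2 ++ [nb])) st).2, x ∈ st.2 ∨ x ∈ l) ∧
      (∀ x ∈ (l.foldl (fun st2 nb =>
          if PySem.Set.contains st2.1 nb then st2
          else (PySem.Set.add st2.1 nb, st2.2 ++ [nb])) st).2, x ∈ st.2 ∨ x ∉ V) := by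
  intro l
  induction l with
  | nil =>
    intro st hiff
    exact ⟨hiff, by simp, fun x hx => hx, fun x hx => Or.inl hx, fun x hx => Or.inl hx⟩
  | cons a t ih =>
    intro st hiff
    simp only [List.foldl_cons]
    by_cases hc : PySem.Set.contains st.1 a = true
    · simp only [hc, if_true]
      obtain ⟨h1, h2, h3, h4, h5⟩ := ih st hiff
      have ha : a ∈ st.1 := (PySem.Set.contains_iff _ _).mp hc
      refine ⟨h1, ?_, h3, ?_, h5⟩
      · intro x hx
        rcases List.mem_cons.mp hx with h | h
        · subst h
          rcases (hiff x).mp ha with h' | h'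
          · exact (h1 x).mpr (Or.inl h')
          · exact (h1 x).mpr (Or.inr (h3 x h'))
        · exact h2 x h
      · intro x hx
        rcases h4 x hx with h | h
        · exact Or.inl h
        · exact Or.inr (List.mem_cons_of_mem _ h)
    · simp only [hc, if_false, Bool.false_eq_true]
      have ha : a ∉ st.1 := fun h => hc ((PySem.Set.contains_iff _ _).mpr h)
      have hiff1 : ∀ x : Int, x ∈ (PySem.Set.add st.1 a, st.2 ++ [a]).1 ↔
          x ∈ V ∨ x ∈ (PySem.Set.add st.1 a, st.2 ++ [a]).2 := by
        intro x
        rw [PySem.Set.mem_add]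
        simp only [List.mem_append, List.mem_singleton]
        rw [hiff x]
        tauto
      obtain ⟨h1, h2, h3, h4, h5⟩ := ih (PySem.Set.add st.1 a, st.2 ++ [a]) hiff1
      refine ⟨h1, ?_, ?_, ?_, ?_⟩
      · intro x hx
        rcases List.mem_cons.mp hx with h | h
        · subst h
          have hx1 : x ∈ (PySem.Set.add st.1 x, st.2 ++ [x]).1 :=
            (PySem.Set.mem_add _ _ _).mpr (Or.inr rfl)
          rcases (hiff1 x).mp hx1 with h' | h'
          · exact (h1 x).mpr (Or.inl h')
          · exact (h1 x).mpr (Or.inr (h3 x h'))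
        · exact h2 x h
      · intro x hx
        exact h3 x (List.mem_append.mpr (Or.inl hx))
      · intro x hx
        rcases h4 x hx with h | h
        · rcases List.mem_append.mp h with h' | h'
          · exact Or.inl h'
          · exact Or.inr (by simp [List.mem_singleton.mp h'])
        · exact Or.inr (List.mem_cons_of_mem _ h)
      · intro x hx
        rcases h5 x hx with h | h
        · rcases List.mem_append.mp h with h' | h'
          · exact Or.inl h'
          · right
            have hxa : x = a := List.mem_singleton.mp h'
            subst hxa
            intro hxv
            exact ha ((hiff x).mpr (Or.inl hxv))
        · exact Or.inr h

-- the outer 'for node in frontier' fold of B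
lemma foldl_outer_char (graph : List (Int × List Int)) (V : List Int) :
    ∀ (front : List Int) (st : PySem.Set Int × List Int),
      (∀ x : Int, x ∈ st.1 ↔ x ∈ V ∨ x ∈ st.2) →
      (∀ x : Int, x ∈ (front.foldl (bfsInner graph) st).1 ↔
        x ∈ V ∨ x ∈ (front.foldl (bfsInner graph) st).2) ∧
      (∀ node ∈ front, ∀ nb ∈ pyAdj graph node, nb ∈ (front.foldl (bfsInner graph) st).1) ∧
      (∀ x ∈ st.2, x ∈ (front.foldl (bfsInner graph) st).2) ∧
      (∀ x ∈ (front.foldl (bfsInner graph) st).2,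
        x ∈ st.2 ∨ ∃ node ∈ front, x ∈ pyAdj graph node) ∧
      (∀ x ∈ (front.foldl (bfsInner graph) st).2, x ∈ st.2 ∨ x ∉ V) := by
  intro front
  induction front with
  | nil =>
    intro st hiff
    exact ⟨hiff, by simp, fun x hx => hx, fun x hx => Or.inl hx, fun x hx => Or.inl hx⟩
  | cons node t ih =>
    intro st hiff
    simp only [List.foldl_cons]
    obtain ⟨i1, i2, i3, i4, i5⟩ := foldl_inner_char V (pyAdj graph node) st hiff
    obtain ⟨h1, h2, h3, h4, h5⟩ := ih (bfsInner graph st node) i1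
    have hmono : ∀ x ∈ (bfsInner graph st node).1,
        x ∈ (t.foldl (bfsInner graph) (bfsInner graph st node)).1 := by
      intro x hx
      rcases (i1 x).mp hx with h | h
      · exact (h1 x).mpr (Or.inl h)
      · exact (h1 x).mpr (Or.inr (h3 x h))
    refine ⟨h1, ?_, ?_, ?_, ?_⟩
    · intro nd hnd nb hnb
      rcases List.mem_cons.mp hnd with h | h
      · subst h
        exact hmono nb (i2 nb hnb)
      · exact h2 nd h nb hnb
    · intro x hx
      exact h3 x (i3 x hx)
    · intro x hx
      rcases h4 x hx with h | h
      · rcases i4 x h with h' | h'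
        · exact Or.inl h'
        · exact Or.inr ⟨node, List.mem_cons_self, h'⟩
      · obtain ⟨nd, hnd, hnb⟩ := h
        exact Or.inr ⟨nd, List.mem_cons_of_mem _ hnd, hnb⟩
    · intro x hx
      rcases h5 x hx with h | h
      · rcases i5 x h with h' | h'
        · exact Or.inl h'
        · exact Or.inr h'
      · exact Or.inr h

lemma bfsLoop_main (graph : List (Int × List Int)) :
    ∀ (fuel : Nat) (frontier visited : List Int),
      phiB graph frontier visited < fuel →
      (∀ v ∈ frontier, Reach graph v) →
      (∀ v ∈ visited, Reach graph v) →
      (1 : Int) ∈ visited →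
      (∀ v ∈ visited, (∀ nb ∈ pyAdj graph v, nb ∈ visited) ∨ v ∈ frontier) →
      (∀ v ∈ bfsLoop graph fuel frontier visited, Reach graph v) ∧
        (1 : Int) ∈ bfsLoop graph fuel frontier visited ∧
        (∀ v ∈ bfsLoop graph fuel frontier visited, ∀ nb ∈ pyAdj graph v,
          nb ∈ bfsLoop graph fuel frontier visited) := by
  intro fuel
  induction fuel with
  | zero => intro frontier visited hphi; exact absurd hphi (Nat.not_lt_zero _)
  | succ fuel ih =>
    intro frontier visited hphi hf hv h1 hdisj
    cases frontier with
    | nil =>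
      simp only [bfsLoop, List.isEmpty_nil, if_true]
      refine ⟨hv, h1, ?_⟩
      intro v hvv nb hnb
      rcases hdisj v hvv with h | h
      · exact h nb hnb
      · exact absurd h (List.not_mem_nil)
    | cons n0 t0 =>
      simp only [bfsLoop, List.isEmpty_cons, if_false, Bool.false_eq_true]
      obtain ⟨o1, o2, o3, o4, o5⟩ := foldl_outer_char graph visited (n0 :: t0) (visited, [])
        (by intro x; simp)
      have hnxt : ∀ x ∈ ((n0 :: t0).foldl (bfsInner graph) (visited, ([] : List Int))).2,
          ∃ node ∈ n0 :: t0, x ∈ pyAdj graph node := by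
        intro x hx
        rcases o4 x hx with h | h
        · exact absurd h (List.not_mem_nil)
        · exact h
      have hnotv : ∀ x ∈ ((n0 :: t0).foldl (bfsInner graph) (visited, ([] : List Int))).2,
          x ∉ visited := by
        intro x hx
        rcases o5 x hx with h | h
        · exact absurd h (List.not_mem_nil)
        · exact h
      have hvsub : ∀ x ∈ visited,
          x ∈ ((n0 :: t0).foldl (bfsInner graph) (visited, ([] : List Int))).1 :=
        fun x hx => (o1 x).mpr (Or.inl hx)
      refine ih _ _ ?_ ?_ ?_ ((o1 1).mpr (Or.inl h1)) ?_
      · -- the potential drops: the visited set only grows, and a nonempty next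
        -- frontier contains a freshly marked node of pvNodes
        have hcardle : ((pvNodes graph).toFinset \
              ((n0 :: t0).foldl (bfsInner graph) (visited, ([] : List Int))).1.toFinset).card ≤
            ((pvNodes graph).toFinset \ visited.toFinset).card := by
          apply Finset.card_le_card
          intro x hx
          simp only [Finset.mem_sdiff, List.mem_toFinset] at hx ⊢
          exact ⟨hx.1, fun hxv => hx.2 (hvsub x hxv)⟩
        unfold phiB at hphi ⊢
        rw [if_neg (List.cons_ne_nil n0 t0)] at hphi
        rcases hst2 : ((n0 :: t0).foldl (bfsInner graph) (visited, ([] : List Int))).2 with _ | ⟨e, t⟩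
        · rw [if_pos rfl]
          omega
        · have he : e ∈ ((n0 :: t0).foldl (bfsInner graph) (visited, ([] : List Int))).2 := by
            rw [hst2]; exact List.mem_cons_self
          have heP : e ∈ (pvNodes graph).toFinset \ visited.toFinset := by
            rw [Finset.mem_sdiff, List.mem_toFinset, List.mem_toFinset]
            obtain ⟨nd, _, hnb⟩ := hnxt e he
            exact ⟨mem_pyAdj_pvNodes graph nd e hnb, hnotv e he⟩
          have hev : e ∈ ((n0 :: t0).foldl (bfsInner graph) (visited, ([] : List Int))).1 :=
            (o1 e).mpr (Or.inr he)
          have hsub : (pvNodes graph).toFinset \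
                ((n0 :: t0).foldl (bfsInner graph) (visited, ([] : List Int))).1.toFinset ⊆
              ((pvNodes graph).toFinset \ visited.toFinset).erase e := by
            intro x hx
            rw [Finset.mem_sdiff, List.mem_toFinset] at hx
            rw [Finset.mem_erase, Finset.mem_sdiff, List.mem_toFinset, List.mem_toFinset]
            refine ⟨fun hxe => hx.2 (List.mem_toFinset.mpr (hxe ▸ hev)), hx.1,
              fun hxv => hx.2 (List.mem_toFinset.mpr (hvsub x hxv))⟩
          have hlt : ((pvNodes graph).toFinset \
                ((n0 :: t0).foldl (bfsInner graph) (visited, ([] : List Int))).1.toFinset).card <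
              ((pvNodes graph).toFinset \ visited.toFinset).card := by
            calc _ ≤ (((pvNodes graph).toFinset \ visited.toFinset).erase e).card :=
                  Finset.card_le_card hsub
              _ < ((pvNodes graph).toFinset \ visited.toFinset).card :=
                  Finset.card_erase_lt_of_mem heP
          rw [if_neg (List.cons_ne_nil e t)]
          omega
      · intro x hx
        obtain ⟨nd, hnd, hnb⟩ := hnxt x hx
        exact Reach.step (hf nd hnd) hnb
      · intro x hx
        rcases (o1 x).mp hx with h | h
        · exact hv x h
        · obtain ⟨nd, hnd, hnb⟩ := hnxt x h
          exact Reach.step (hf nd hnd) hnb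
      · intro v hvv
        rcases (o1 v).mp hvv with h | h
        · rcases hdisj v h with h' | h'
          · exact Or.inl (fun nb hnb => (o1 nb).mpr (Or.inl (h' nb hnb)))
          · exact Or.inl (fun nb hnb => o2 v h' nb hnb)
        · exact Or.inr h

lemma dfs_alt_char (graph : List (Int × List Int)) :
    (∀ v, Reach graph v → v ≤ dfs_alt graph) ∧ Reach graph (dfs_alt graph) := by
  have hof : (PySem.Set.ofList [(1 : Int)] : List Int) = [1] := rfl
  have h := bfsLoop_main graph (pvFuelB graph) [1] (PySem.Set.ofList [1])
    (by
      rw [hof]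
      unfold phiB pvFuelB
      have hle : ((pvNodes graph).toFinset \ ([(1 : Int)] : List Int).toFinset).card ≤
          (pvNodes graph).length :=
        le_trans (Finset.card_le_card Finset.sdiff_subset) (List.toFinset_card_le _)
      split <;> omega)
    (by intro v hv; rw [List.mem_singleton.mp hv]; exact Reach.one)
    (by rw [hof]; intro v hv; rw [List.mem_singleton.mp hv]; exact Reach.one)
    (by rw [hof]; exact List.mem_singleton_self _)
    (by
      rw [hof]
      intro v hv
      exact Or.inr (by rw [List.mem_singleton.mp hv]; exact List.mem_singleton_self _))
  obtain ⟨hreach, hone, hclosed⟩ := h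
  rcases hmax : PySem.List.max? (bfsLoop graph (pvFuelB graph) [1] (PySem.Set.ofList [1]))
      (fun x => x) with _ | m
  · exact absurd ((PySem.List.max?_eq_none_iff _ _).mp hmax ▸ hone) (List.not_mem_nil)
  · have halt : dfs_alt graph = m := by
      unfold dfs_alt
      rw [hmax]
    rw [halt]
    constructor
    · intro v hv
      have hvmem := reach_subset_closed graph _ hone hclosed v hv
      exact PySem.List.max?_isMax hmax v hvmem
    · exact hreach m (PySem.List.max?_mem hmax)

-- ===== VERDICT (by name: the statement is the Claim_ definition above) =====
theorem dfs_spec : Claim_equal_dfs := by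
  intro graph _ _
  have hA := dfs_char graph
  have hB := dfs_alt_char graph
  show dfs graph = dfs_alt graph
  exact le_antisymm (hB.1 _ hA.2) (hA.1 _ hB.2)
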